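-- pv_equiv track=rewrite | github.com/yauwilliam69/CS10 | text_processing/word_analyzer.py | izzle
-- ===== SOURCE A (Python) =====
-- def izzle(word):
-- 	'''Returns the izzle translation of a word.'''
-- 	i = 0
-- 	temp = word
-- 	new_word = word
-- 	vowel_list = ['a', 'e', 'i', 'o', 'u']
-- 	word_list = [x for x in word]
-- 	word_list_only_vowels = [x for x in word_list if x in vowel_list]
-- 	if len(word_list_only_vowels) > 1:
-- 		while not word[-i-1] in vowel_list:
-- 			new_word = temp[:-1]
-- 			temp = new_word
-- 			i += 1
-- 		return (new_word[:-1] + 'izzle')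
-- 	else:
-- 		return 'izzle'
-- ===== SOURCE B (Python) =====
-- def izzle(word):
--     '''Returns the izzle translation of a word.'''
--     count = 0
--     last = -1
--     for idx, ch in enumerate(word):
--         if ch in 'aeiou':
--             count += 1
--             last = idx
--     if count > 1:
--         return word[:last] + 'izzle'
--     return 'izzle'
-- ===== Notes on version B (the rewrite author's own statement) =====
-- stated objective: faster
-- what changed: Replaced A's trailing-consonant peeling while-loop over negative indices (with temp/new_word string copies and a separate vowel-filter list) by one forward pass that records the vowel count and last vowel index, followed by a single slice word[:last].
import Mathlib
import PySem

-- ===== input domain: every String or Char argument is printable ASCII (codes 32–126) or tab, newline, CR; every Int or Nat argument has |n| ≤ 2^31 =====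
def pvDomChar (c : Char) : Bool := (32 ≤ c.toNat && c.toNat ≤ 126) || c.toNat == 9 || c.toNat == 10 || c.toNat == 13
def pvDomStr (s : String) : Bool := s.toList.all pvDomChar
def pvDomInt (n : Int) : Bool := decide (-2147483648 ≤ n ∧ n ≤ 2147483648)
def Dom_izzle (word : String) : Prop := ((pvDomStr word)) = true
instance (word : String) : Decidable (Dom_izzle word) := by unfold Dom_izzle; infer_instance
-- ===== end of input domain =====

-- B replaces A's trailing-consonant peeling while-loop by one forward pass that records the
-- vowel count and the last vowel index, then takes a single slice (objective: simpler).

-- ===== PORT A =====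
-- A's while loop: condition reads word[-i-1]; body sets new_word = temp[:-1]; temp = new_word; i += 1.
-- fuel = word length is enough: with > 1 vowels the loop stops at the last vowel, after < len steps.
def izzleLoopA (wl : List Char) (fuel : Nat) (temp new_word : List Char) (i : Int) : List Char :=
  match fuel with
  | 0 => new_word
  | f + 1 =>
    match PySem.List.pyGet? wl (-i - 1) with
    | none => new_word          -- IndexError (unreachable in the branch where the loop runs)
    | some c =>
      if (['a', 'e', 'i', 'o', 'u'] : List Char).contains c then new_word
      else izzleLoopA wl f (PySem.List.slice temp none (some (-1)))
                           (PySem.List.slice temp none (some (-1))) (i + 1)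

def izzle (word : String) : String :=
  let wl := word.toList
  let vowel_list : List Char := ['a', 'e', 'i', 'o', 'u']
  let word_list := wl                                   -- [x for x in word]
  let word_list_only_vowels := word_list.filter (fun x => vowel_list.contains x)
  if word_list_only_vowels.length > 1 then
    String.ofList (PySem.List.slice (izzleLoopA wl wl.length wl wl 0) none (some (-1)) ++ "izzle".toList)
  else "izzle"

-- ===== PORT B =====
-- one forward pass over enumerate(word): state = (vowel count, index of last vowel so far)
def izzle_alt (word : String) : String :=
  let st :=
    (PySem.List.enumerate word.toList 0).foldl
      (fun (st : Int × Int) p =>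
        if ("aeiou".toList).contains p.2 then (st.1 + 1, p.1) else st)  -- ch in 'aeiou' (single char)
      (0, -1)
  if st.1 > 1 then
    String.ofList (PySem.List.slice word.toList none (some st.2) ++ "izzle".toList)
  else "izzle"

-- ===== PRECONDITION & SPEC =====
def Spec_izzle (word : String) (out : String) : Prop := out = izzle_alt word
instance (word : String) (out : String) : Decidable (Spec_izzle word out) := by unfold Spec_izzle; infer_instance

-- ===== CLAIM (what is proved, stated in full; the proofs are below) =====
def Claim_equal_izzle : Prop := ∀ (word : String), Dom_izzle word → Spec_izzle word (izzle word)

-- ===== LEMMAS AND PROOFS =====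

def pvVow (c : Char) : Bool := (['a', 'e', 'i', 'o', 'u'] : List Char).contains c

def pvFoldB (wl : List Char) : Int × Int :=
  (PySem.List.enumerate wl 0).foldl
    (fun (st : Int × Int) p => if pvVow p.2 then (st.1 + 1, p.1) else st) (0, -1)

theorem pvFoldB_append (xs : List Char) (x : Char) :
    pvFoldB (xs ++ [x]) =
      if pvVow x then ((pvFoldB xs).1 + 1, (xs.length : Int)) else pvFoldB xs := by
  unfold pvFoldB
  rw [PySem.List.enumerate_append, List.foldl_append]
  simp

theorem pvFoldB_fst (xs : List Char) :
    (pvFoldB xs).1 = ((xs.filter pvVow).length : Int) := by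
  induction xs using List.reverseRecOn with
  | nil => rfl
  | append_singleton xs x ih =>
      rw [pvFoldB_append]
      by_cases h : pvVow x <;> simp [h, ih]

theorem pvFoldB_snd (xs : List Char) (h : 1 ≤ (xs.filter pvVow).length) :
    ∃ jn : Nat, (pvFoldB xs).2 = (jn : Int) ∧ jn < xs.length ∧
      pvVow (xs.getD jn ' ') = true ∧
      ∀ k, jn < k → k < xs.length → pvVow (xs.getD k ' ') = false := by
  induction xs using List.reverseRecOn with
  | nil => simp at h
  | append_singleton xs x ih =>
      rw [pvFoldB_append]
      by_cases hx : pvVow x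
      · refine ⟨xs.length, by simp [hx], by simp, ?_, ?_⟩
        · simp [hx]
        · intro k hk1 hk2; simp at hk2; omega
      · have h1 : 1 ≤ (xs.filter pvVow).length := by
          simp [List.filter_append, hx] at h; simpa using h
        obtain ⟨jn, hj1, hj2, hj3, hj4⟩ := ih h1
        refine ⟨jn, by simp [hx, hj1], by simp; omega, ?_, ?_⟩
        · rwa [List.getD_append _ _ _ _ hj2]
        · intro k hk1 hk2
          simp at hk2
          rcases Nat.lt_or_ge k xs.length with hk | hk
          · rw [List.getD_append _ _ _ _ hk]; exact hj4 k hk1 hk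
          · have : k = xs.length := by omega
            subst this
            simpa [List.getD_append_right] using hx

theorem pvTake_dropLast (xs : List Char) (m : Nat) (h : m ≤ xs.length) :
    (xs.take m).dropLast = xs.take (m - 1) := by
  rw [List.dropLast_eq_take, List.take_take]
  congr 1
  simp [List.length_take, Nat.min_eq_left h]

theorem pvLoopA (wl : List Char) (jn : Nat)
    (hj2 : jn < wl.length)
    (hj3 : pvVow (wl.getD jn ' ') = true)
    (hj4 : ∀ k, jn < k → k < wl.length → pvVow (wl.getD k ' ') = false) :
    ∀ f i : Nat, f + i = wl.length → i ≤ wl.length - 1 - jn →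
      izzleLoopA wl f (wl.take (wl.length - i)) (wl.take (wl.length - i)) (i : Int)
        = wl.take (jn + 1) := by
  intro f
  induction f with
  | zero => intro i hf hi; omega
  | succ f ih =>
      intro i hf hi
      have hidx : (-(i : Int) - 1) = -(((i + 1 : Nat) : Int)) := by push_cast; ring
      unfold izzleLoopA
      rw [hidx, PySem.List.pyGet?_neg_natCast wl (i + 1) (by omega) (by omega)]
      have hget : wl[wl.length - (i + 1)]? = some (wl.getD (wl.length - (i + 1)) ' ') := by
        rw [List.getD_eq_getElem?_getD, List.getElem?_eq_getElem (by omega)]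
        rfl
      rw [hget]
      simp only []
      rcases Nat.eq_or_lt_of_le hi with heq | hlt
      · -- i = wl.length - 1 - jn : the indexed char is the last vowel; loop stops
        have hpos : wl.length - (i + 1) = jn := by omega
        rw [hpos]
        simp only [pvVow] at hj3
        rw [hj3]
        simp only [if_true]
        congr 1
        omega
      · -- indexed char is past the last vowel: not a vowel, recurse
        have hgt : jn < wl.length - (i + 1) := by omega
        have hnv := hj4 _ hgt (by omega)
        simp only [pvVow] at hnv
        rw [hnv]
        simp only [Bool.false_eq_true, if_false]
        rw [PySem.List.slice_to_neg_one, pvTake_dropLast wl _ (by omega)]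
        have harg : wl.length - i - 1 = wl.length - (i + 1) := by omega
        have hcast : (i : Int) + 1 = ((i + 1 : Nat) : Int) := by push_cast; ring
        rw [harg, hcast]
        exact ih (i + 1) (by omega) (by omega)

theorem pvVow_chars : ("aeiou".toList) = (['a', 'e', 'i', 'o', 'u'] : List Char) := by decide

-- ===== VERDICT (by name: the statement is the Claim_ definition above) =====
theorem izzle_spec : Claim_equal_izzle := by
  intro word _
  unfold Spec_izzle izzle izzle_alt
  simp only [pvVow_chars]
  have hfold :
      ((PySem.List.enumerate word.toList 0).foldl
        (fun (st : Int × Int) p =>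
          if (['a', 'e', 'i', 'o', 'u'] : List Char).contains p.2 then (st.1 + 1, p.1) else st)
        (0, -1)) = pvFoldB word.toList := by
    unfold pvFoldB pvVow; rfl
  rw [hfold]
  set wl := word.toList with hwl
  by_cases hc : 1 < (wl.filter pvVow).length
  · obtain ⟨jn, hj1, hj2, hj3, hj4⟩ := pvFoldB_snd wl (by omega)
    have hloop := pvLoopA wl jn hj2 hj3 hj4 wl.length 0 (by omega) (by omega)
    simp only [Nat.cast_zero, Nat.sub_zero, List.take_length] at hloop
    have hfilter : (wl.filter fun x => (['a','e','i','o','u'] : List Char).contains x)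
        = wl.filter pvVow := rfl
    rw [hfilter, if_pos hc, hloop]
    rw [pvFoldB_fst, hj1]
    rw [if_pos (by exact_mod_cast hc)]
    rw [PySem.List.slice_to_neg_one, pvTake_dropLast wl _ (by omega), PySem.List.slice_to_natCast]
    simp
  · have hfilter : (wl.filter fun x => (['a','e','i','o','u'] : List Char).contains x)
        = wl.filter pvVow := rfl
    rw [hfilter, if_neg hc, pvFoldB_fst]
    rw [if_neg (by exact_mod_cast hc)]
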